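-- pv_equiv track=rewrite | github.com/xpessoles/Informatique | Exercices/03_tableaux/pyramide/d01s-cor-ms.py | nbmax_val
-- ===== SOURCE A (Python) =====
-- def nbmax_val(L,x):
--     """Nombre max de x consécutifs de L"""
--     i = 0
--     nx = 0
--     m = 0
--     # Idée : on parcourt L
--     # Tant que l'on rencontre un zéro, on augmente le compteur.
--     # Si l'on rencontre autre chose que 0, on le met à 0.
--     for i in range(len(L)):
--         if L[i] == x:
--             nx = nx + 1
--             if nx > m:
--                 m = nx
--         else :
--             nx = 0
--     return m
-- ===== SOURCE B (Python) =====
-- def nbmax_val(L, x):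
--     """Nombre max de x consecutifs de L (run-decomposition: two-pointer over maximal runs)."""
--     m = 0
--     i = 0
--     n = len(L)
--     while i < n:
--         j = i + 1
--         while j < n and L[j] == L[i]:
--             j += 1
--         if L[i] == x:
--             m = max(m, j - i)
--         i = j
--     return m
-- ===== Notes on version B (the rewrite author's own statement) =====
-- stated objective: alternative
-- what changed: Replaces A's single pass maintaining a running counter and running maximum by a two-pointer run-decomposition: an inner scan finds each maximal run of equal elements, and the maximum length of the runs whose value is x is taken.
import Mathlib
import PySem

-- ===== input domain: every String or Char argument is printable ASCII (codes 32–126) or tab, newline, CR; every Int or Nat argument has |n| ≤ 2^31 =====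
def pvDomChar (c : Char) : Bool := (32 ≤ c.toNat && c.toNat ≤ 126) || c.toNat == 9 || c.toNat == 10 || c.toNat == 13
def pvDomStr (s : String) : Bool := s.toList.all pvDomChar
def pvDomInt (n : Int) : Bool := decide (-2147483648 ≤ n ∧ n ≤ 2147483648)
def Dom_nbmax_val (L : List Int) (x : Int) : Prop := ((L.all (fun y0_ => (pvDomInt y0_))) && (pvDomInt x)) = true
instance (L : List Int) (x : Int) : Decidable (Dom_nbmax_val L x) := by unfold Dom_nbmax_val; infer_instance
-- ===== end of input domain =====

-- B replaces A's running counter + running maximum by a two-pointer run decomposition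
-- (scan each maximal run of equal elements, take the max length among runs of value x);
-- objective: alternative structure, same O(n) cost.

-- ===== PORT A =====
-- one step of A's for-loop body: state (nx, m)
def stepA (x : Int) (s : Int × Int) (v : Int) : Int × Int :=
  if v = x then
    let nx := s.1 + 1
    (nx, if nx > s.2 then nx else s.2)
  else (0, s.2)

def nbmax_val (L : List Int) (x : Int) : Int :=
  ((PySem.List.pyRange 0 (L.length : Int) 1).foldl
      (fun s i => stepA x s (PySem.List.pyGetD L i 0)) (0, 0)).2

-- ===== PORT B =====
-- the outer while-loop of Source B: remaining list + running maximum m; the inner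
-- while (advancing j over the current maximal run) is takeWhile/dropWhile
def goB (x : Int) (L : List Int) (m : Int) : Int :=
  match L with
  | [] => m
  | a :: t =>
      goB x (t.dropWhile (· == a)) (if a = x then max m (1 + ((t.takeWhile (· == a)).length : Int)) else m)
termination_by L.length
decreasing_by
  simp only [List.length_cons]
  exact Nat.lt_succ_of_le (List.length_dropWhile_le _ t)

def nbmax_val_alt (L : List Int) (x : Int) : Int := goB x L 0

-- ===== PRECONDITION & SPEC =====
def Spec_nbmax_val (L : List Int) (x : Int) (out : Int) : Prop := out = nbmax_val_alt L x
instance (L : List Int) (x : Int) (out : Int) : Decidable (Spec_nbmax_val L x out) := by unfold Spec_nbmax_val; infer_instance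

-- ===== CLAIM (what is proved, stated in full; the proofs are below) =====
def Claim_equal_nbmax_val : Prop := ∀ (L : List Int) (x : Int), Dom_nbmax_val L x → Spec_nbmax_val L x (nbmax_val L x)

-- ===== LEMMAS AND PROOFS =====

-- A's loop as a plain foldl over the list
lemma nbmax_val_eq_foldl (L : List Int) (x : Int) :
    nbmax_val L x = (L.foldl (stepA x) (0, 0)).2 := by
  unfold nbmax_val
  rw [PySem.List.foldl_pyRange_zero_pyGetD' L 0 (stepA x) (0, 0)]

lemma stepA_of_eq (x : Int) (s : Int × Int) : stepA x s x = (s.1 + 1, max s.2 (s.1 + 1)) := by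
  unfold stepA
  rw [if_pos rfl, Prod.mk.injEq]
  exact ⟨rfl, by split_ifs <;> omega⟩

lemma stepA_of_ne (x : Int) (s : Int × Int) {v : Int} (h : v ≠ x) : stepA x s v = (0, s.2) := by
  simp [stepA, h]

-- A's fold across a run of k copies of x
lemma foldA_replicate (x : Int) (r : List Int) :
    ∀ (k : ℕ) (nx m : Int), nx ≤ m →
      (List.foldl (stepA x) (nx, m) (List.replicate k x ++ r))
        = List.foldl (stepA x) (nx + k, max m (nx + k)) r := by
  intro k
  induction k with
  | zero =>
      intro nx m h
      simp only [List.replicate, List.nil_append, Nat.cast_zero, add_zero]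
      rw [max_eq_left h]
  | succ k ih =>
      intro nx m h
      simp only [List.replicate_succ, List.cons_append, List.foldl_cons, stepA_of_eq]
      rw [ih (nx + 1) (max m (nx + 1)) (le_max_right _ _)]
      congr 1
      rw [Prod.mk.injEq]
      constructor
      · push_cast; omega
      · push_cast; omega

-- takeWhile (· == a) produces replicate
lemma takeWhile_eq_replicate (a : Int) (t : List Int) :
    t.takeWhile (· == a) = List.replicate (t.takeWhile (· == a)).length a := by
  apply List.eq_replicate_of_mem
  intro b hb
  have := List.mem_takeWhile_imp hb
  simpa using this

lemma head_dropWhile_ne (a : Int) (t : List Int) :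
    ∀ b r, t.dropWhile (· == a) = b :: r → b ≠ a := by
  intro b r h hba
  have := List.head_dropWhile_not (p := (· == a)) (l := t)
  rw [h] at this
  simp at this
  exact this (by simp [hba])

-- main invariant: A's fold from a fresh counter equals B's run loop
lemma foldA_eq_goB (x : Int) :
    ∀ (n : ℕ) (L : List Int), L.length ≤ n → ∀ (m : Int), 0 ≤ m →
      (List.foldl (stepA x) (0, m) L).2 = goB x L m := by
  intro n
  induction n with
  | zero =>
      intro L hL m hm
      have : L = [] := List.eq_nil_of_length_eq_zero (Nat.le_zero.mp hL)
      subst this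
      simp [goB]
  | succ n ih =>
      intro L hL m hm
      match L with
      | [] => simp [goB]
      | a :: t =>
        have hsplit := List.takeWhile_append_dropWhile (p := (· == a)) (l := t)
        have hlen : (t.dropWhile (· == a)).length ≤ n := by
          have := List.length_dropWhile_le (· == a) t
          simp only [List.length_cons] at hL
          omega
        rw [goB]
        by_cases hax : a = x
        · subst hax
          have hrep : a :: t
              = List.replicate (1 + (t.takeWhile (· == a)).length) a ++ t.dropWhile (· == a) := by
            have hr1 : List.replicate (1 + (t.takeWhile (· == a)).length) a
                = a :: List.replicate (t.takeWhile (· == a)).length a := by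
              rw [Nat.add_comm, List.replicate_succ]
            rw [hr1, List.cons_append]
            conv_lhs => rw [← hsplit, takeWhile_eq_replicate a t]
          rw [hrep, foldA_replicate a (t.dropWhile (· == a)) (1 + (t.takeWhile (· == a)).length) 0 m hm]
          simp only [zero_add, if_true]
          rcases hdw : t.dropWhile (· == a) with _ | ⟨b, r⟩
          · simp only [List.foldl_nil, goB]
            push_cast
            rfl
          · have hb : b ≠ a := head_dropWhile_ne a t b r hdw
            have hcast : ((1 + (t.takeWhile (· == a)).length : ℕ) : Int)
                = 1 + ((t.takeWhile (· == a)).length : Int) := by push_cast; ring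
            rw [hcast]
            have hlen' : (b :: r).length ≤ n := hdw ▸ hlen
            have hih := ih (b :: r) hlen'
              (max m (1 + ((t.takeWhile (· == a)).length : Int)))
              (le_trans hm (le_max_left _ _))
            simp only [List.foldl_cons, stepA_of_ne a _ hb] at hih ⊢
            exact hih
        · have hskip : ∀ (q : List Int), (∀ v ∈ q, v ≠ x) →
              List.foldl (stepA x) ((0 : Int), m) (q ++ t.dropWhile (· == a))
                = List.foldl (stepA x) (0, m) (t.dropWhile (· == a)) := by
            intro q
            induction q with
            | nil => intro _; simp
            | cons c q ihq =>
                intro hq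
                simp only [List.cons_append, List.foldl_cons,
                  stepA_of_ne x _ (hq c (List.mem_cons_self))]
                exact ihq (fun v hv => hq v (List.mem_cons_of_mem _ hv))
        -- decompose the head run, which contributes nothing
          conv_lhs => rw [← hsplit]
          simp only [List.foldl_cons, stepA_of_ne x _ hax]
          rw [hskip (t.takeWhile (· == a)) (fun v hv => by
            have := List.mem_takeWhile_imp hv
            simp at this
            subst this
            exact hax)]
          rw [ih (t.dropWhile (· == a)) hlen m hm]
          simp [hax]

-- ===== VERDICT (by name: the statement is the Claim_ definition above) =====
theorem nbmax_val_spec : Claim_equal_nbmax_val := by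
  intro L x _
  unfold Spec_nbmax_val nbmax_val_alt
  rw [nbmax_val_eq_foldl]
  exact foldA_eq_goB x L.length L (le_refl _) 0 (le_refl 0)
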